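-- pv_equiv track=rewrite | github.com/sarahmayrhofer/train_app | schedule/app/api_services.py | find_next_valid_station_id_and_accumulate
-- ===== SOURCE A (Python) =====
-- def find_next_valid_station_id_and_accumulate(current_index, stations_status, sections):
--     accumulated_fee = 0
--     accumulated_distance = 0
--     next_valid_station_id = None
--
--     # Iterate through the sections, starting from the next index
--     for i in range(current_index + 1, len(stations_status)):
--         if stations_status[i]:
--             next_valid_station_id = stations_status[i]
--             break
--         else:
--             # Accumulate fee and distance for sections marked as False
--             accumulated_fee += sections[i]['fee']
--             accumulated_distance += sections[i]['distance']
--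
--     return next_valid_station_id, accumulated_fee, accumulated_distance
-- ===== SOURCE B (Python) =====
-- def find_next_valid_station_id_and_accumulate(current_index, stations_status, sections):
--     # Phase 1: find the boundary b = index of the first truthy station, else len.
--     n = len(stations_status)
--     next_valid_station_id, b = None, n
--     for i in range(current_index + 1, n):
--         if stations_status[i]:
--             next_valid_station_id, b = stations_status[i], i
--             break
--     # Phase 2: two summing passes over the skipped range.
--     accumulated_fee = sum(sections[i]['fee'] for i in range(current_index + 1, b))
--     accumulated_distance = sum(sections[i]['distance'] for i in range(current_index + 1, b))
--     return next_valid_station_id, accumulated_fee, accumulated_distance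
-- ===== Notes on version B (the rewrite author's own statement) =====
-- stated objective: alternative
-- what changed: A's single fused loop that searches for the next truthy station while accumulating fee and distance is replaced by a boundary search (first truthy index, defaulting to len) followed by two separate summing passes over the skipped range.
import Mathlib
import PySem

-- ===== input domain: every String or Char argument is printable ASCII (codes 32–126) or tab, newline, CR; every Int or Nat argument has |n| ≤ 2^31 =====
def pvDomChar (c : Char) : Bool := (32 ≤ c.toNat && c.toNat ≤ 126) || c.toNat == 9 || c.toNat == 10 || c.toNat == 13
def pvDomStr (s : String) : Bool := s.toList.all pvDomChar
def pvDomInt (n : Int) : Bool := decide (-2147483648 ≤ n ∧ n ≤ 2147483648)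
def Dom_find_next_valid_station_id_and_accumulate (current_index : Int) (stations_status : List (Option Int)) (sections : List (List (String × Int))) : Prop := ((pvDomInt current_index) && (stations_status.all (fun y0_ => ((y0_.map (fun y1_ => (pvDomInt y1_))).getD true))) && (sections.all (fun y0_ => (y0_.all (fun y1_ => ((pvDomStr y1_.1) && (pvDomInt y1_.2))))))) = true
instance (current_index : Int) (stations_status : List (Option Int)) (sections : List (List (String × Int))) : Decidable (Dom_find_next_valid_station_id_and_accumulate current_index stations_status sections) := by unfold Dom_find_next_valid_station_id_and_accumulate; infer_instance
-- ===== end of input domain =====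

-- B replaces A's single fused search-and-accumulate loop by a boundary search followed by
-- two separate summing passes over the skipped range (objective: alternative decomposition).

-- ===== PORT A =====
-- Python truthiness of an Optional[int]: None and 0 are falsy.
def pvTruthy : Option Int → Bool
  | none => false
  | some v => v != 0

-- A's fused loop over the index list of range(current_index+1, len(stations_status)):
-- break with the station value on the first truthy status, else accumulate fee/distance.
-- (The 'none'/missing-key fallthrough branches are IndexError/KeyError in Python: outside Pre_.)
def pvLoopA : List Int → List (Option Int) → List (List (String × Int)) → Int → Int → Option Int × Int × Int
  | [], _, _, fee, dist => (none, fee, dist)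
  | i :: rest, st, secs, fee, dist =>
    match PySem.List.pyGet? st i with
    | none => (none, fee, dist)
    | some o =>
      if pvTruthy o then (o, fee, dist)
      else
        match PySem.List.pyGet? secs i with
        | none => (none, fee, dist)
        | some sec =>
          match List.lookup "fee" sec, List.lookup "distance" sec with
          | some f, some d => pvLoopA rest st secs (fee + f) (dist + d)
          | _, _ => (none, fee, dist)

def find_next_valid_station_id_and_accumulate (current_index : Int) (stations_status : List (Option Int)) (sections : List (List (String × Int))) : Option Int × Int × Int :=
  pvLoopA (PySem.List.pyRange (current_index + 1) (stations_status.length : Int) 1) stations_status sections 0 0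

-- ===== PORT B =====
-- Phase 1: boundary search only — first truthy station's value and its index, else (none, len).
def pvFindB : List Int → List (Option Int) → Int → Option Int × Int
  | [], _, n => (none, n)
  | i :: rest, st, n =>
    match PySem.List.pyGet? st i with
    | none => (none, n)
    | some o => if pvTruthy o then (o, i) else pvFindB rest st n

-- Phase 2: one summing pass 'sum(sections[i][key] for i in L)' (missing index/key = 0, unreached inside Pre_).
def pvSumKey (key : String) (secs : List (List (String × Int))) (L : List Int) : Int :=
  L.foldl (fun acc i =>
    acc + (match PySem.List.pyGet? secs i with
           | some sec => (List.lookup key sec).getD 0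
           | none => 0)) 0

def find_next_valid_station_id_and_accumulate_alt (current_index : Int) (stations_status : List (Option Int)) (sections : List (List (String × Int))) : Option Int × Int × Int :=
  let n : Int := (stations_status.length : Int)
  let p := pvFindB (PySem.List.pyRange (current_index + 1) n 1) stations_status n
  (p.1, pvSumKey "fee" sections (PySem.List.pyRange (current_index + 1) p.2 1),
        pvSumKey "distance" sections (PySem.List.pyRange (current_index + 1) p.2 1))

-- ===== PRECONDITION & SPEC =====
def pvFalsyAt (st : List (Option Int)) (j : Int) : Bool :=
  match PySem.List.pyGet? st j with
  | some o => !pvTruthy o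
  | none => false

def pvGoodSecAt (secs : List (List (String × Int))) (i : Int) : Bool :=
  (PySem.List.pyGet? secs i).isSome
  && (List.lookup "fee" ((PySem.List.pyGet? secs i).getD [])).isSome
  && (List.lookup "distance" ((PySem.List.pyGet? secs i).getD [])).isSome

-- Pre_ excludes exactly the inputs on which A raises: a scanned index (all earlier scanned
-- statuses falsy) that is out of range (IndexError) or whose status is falsy while its
-- section is missing or lacks the 'fee'/'distance' key (IndexError/KeyError). The first
-- conjunct only short-circuits the always-IndexError case current_index + 1 < -len.
def Pre_find_next_valid_station_id_and_accumulate (current_index : Int) (stations_status : List (Option Int)) (sections : List (List (String × Int))) : Prop :=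
  (-(stations_status.length : Int) ≤ current_index + 1) ∧
  ∀ i ∈ PySem.List.pyRange (current_index + 1) (stations_status.length : Int) 1,
    (∀ j ∈ PySem.List.pyRange (current_index + 1) i 1, pvFalsyAt stations_status j = true) →
    ((PySem.List.pyGet? stations_status i).isSome
      ∧ (pvFalsyAt stations_status i = true → pvGoodSecAt sections i = true))
instance (current_index : Int) (stations_status : List (Option Int)) (sections : List (List (String × Int))) : Decidable (Pre_find_next_valid_station_id_and_accumulate current_index stations_status sections) := by unfold Pre_find_next_valid_station_id_and_accumulate; infer_instance

def pvWitness_find_next_valid_station_id_and_accumulate : Int × List (Option Int) × (List (List (String × Int))) :=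
  (-1, [none, some 2], [[("fee", 1), ("distance", 2)], []])

def Spec_find_next_valid_station_id_and_accumulate (current_index : Int) (stations_status : List (Option Int)) (sections : List (List (String × Int))) (out : Option Int × Int × Int) : Prop := out = find_next_valid_station_id_and_accumulate_alt current_index stations_status sections
instance (current_index : Int) (stations_status : List (Option Int)) (sections : List (List (String × Int))) (out : Option Int × Int × Int) : Decidable (Spec_find_next_valid_station_id_and_accumulate current_index stations_status sections out) := by unfold Spec_find_next_valid_station_id_and_accumulate; infer_instance

-- ===== CLAIM (what is proved, stated in full; the proofs are below) =====
def Claim_equal_find_next_valid_station_id_and_accumulate : Prop := ∀ (current_index : Int) (stations_status : List (Option Int)) (sections : List (List (String × Int))), Dom_find_next_valid_station_id_and_accumulate current_index stations_status sections → Pre_find_next_valid_station_id_and_accumulate current_index stations_status sections → Spec_find_next_valid_station_id_and_accumulate current_index stations_status sections (find_next_valid_station_id_and_accumulate current_index stations_status sections)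

-- ===== LEMMAS AND PROOFS =====

theorem pvWitness_ok :
    Dom_find_next_valid_station_id_and_accumulate
      pvWitness_find_next_valid_station_id_and_accumulate.1
      pvWitness_find_next_valid_station_id_and_accumulate.2.1
      pvWitness_find_next_valid_station_id_and_accumulate.2.2
    ∧ Pre_find_next_valid_station_id_and_accumulate
      pvWitness_find_next_valid_station_id_and_accumulate.1
      pvWitness_find_next_valid_station_id_and_accumulate.2.1
      pvWitness_find_next_valid_station_id_and_accumulate.2.2 := by
  decide

-- bounds on the boundary returned by the search phase
theorem pvFindB_bounds (st : List (Option Int)) (n : Int) :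
    ∀ (k : ℕ) (s : Int), s ≤ n → n - s ≤ (k : Int) →
      s ≤ (pvFindB (PySem.List.pyRange s n 1) st n).2
      ∧ (pvFindB (PySem.List.pyRange s n 1) st n).2 ≤ n := by
  intro k
  induction k with
  | zero =>
    intro s hsn hk
    have hns : n ≤ s := by omega
    rw [PySem.List.pyRange_one_eq_nil hns]
    simp [pvFindB]; omega
  | succ k ih =>
    intro s hsn hk
    by_cases hlt : s < n
    · rw [PySem.List.pyRange_one_cons hlt]
      simp only [pvFindB]
      cases hget : PySem.List.pyGet? st s with
      | none => simp; omega
      | some o =>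
        by_cases ht : pvTruthy o = true
        · simp [ht]; omega
        · have := ih (s + 1) (by omega) (by omega)
          simp [ht]; omega
    · have hns : n ≤ s := by omega
      rw [PySem.List.pyRange_one_eq_nil hns]
      simp [pvFindB]; omega

-- the summing pass is an additive fold
theorem pvSumKey_cons (key : String) (secs : List (List (String × Int))) (i : Int) (L : List Int) :
    pvSumKey key secs (i :: L) =
      (match PySem.List.pyGet? secs i with
       | some sec => (List.lookup key sec).getD 0
       | none => 0) + pvSumKey key secs L := by
  simp only [pvSumKey, List.foldl_cons]
  rw [PySem.List.foldl_add, PySem.List.foldl_add]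
  ring

-- main invariant lemma: the fused loop equals boundary search + two summing passes
theorem pvMain (st : List (Option Int)) (secs : List (List (String × Int))) :
    ∀ (k : ℕ) (s : Int), (st.length : Int) - s ≤ (k : Int) →
      (∀ i ∈ PySem.List.pyRange s (st.length : Int) 1,
        (∀ j ∈ PySem.List.pyRange s i 1, pvFalsyAt st j = true) →
        ((PySem.List.pyGet? st i).isSome ∧ (pvFalsyAt st i = true → pvGoodSecAt secs i = true))) →
      ∀ fee dist,
        pvLoopA (PySem.List.pyRange s (st.length : Int) 1) st secs fee dist =
          ((pvFindB (PySem.List.pyRange s (st.length : Int) 1) st (st.length : Int)).1,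
           fee + pvSumKey "fee" secs (PySem.List.pyRange s (pvFindB (PySem.List.pyRange s (st.length : Int) 1) st (st.length : Int)).2 1),
           dist + pvSumKey "distance" secs (PySem.List.pyRange s (pvFindB (PySem.List.pyRange s (st.length : Int) 1) st (st.length : Int)).2 1)) := by
  intro k
  induction k with
  | zero =>
    intro s hk _ fee dist
    have hns : (st.length : Int) ≤ s := by omega
    rw [PySem.List.pyRange_one_eq_nil hns]
    simp [pvLoopA, pvFindB, PySem.List.pyRange_one_eq_nil hns, pvSumKey]
  | succ k ih =>
    intro s hk hinv fee dist
    by_cases hlt : s < (st.length : Int)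
    · rw [PySem.List.pyRange_one_cons hlt]
      have hs_mem : s ∈ PySem.List.pyRange s (st.length : Int) 1 := by
        rw [PySem.List.mem_pyRange_one]; omega
      have hpre : ∀ j ∈ PySem.List.pyRange s s 1, pvFalsyAt st j = true := by
        intro j hj; rw [PySem.List.mem_pyRange_one] at hj; omega
      obtain ⟨hsome, hgood⟩ := hinv s hs_mem hpre
      cases hget : PySem.List.pyGet? st s with
      | none => rw [hget] at hsome; simp at hsome
      | some o =>
        by_cases ht : pvTruthy o = true
        · simp only [pvLoopA, pvFindB, hget, ht, if_true]
          have : PySem.List.pyRange s s 1 = [] := PySem.List.pyRange_one_eq_nil (le_refl s)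
          simp [this, pvSumKey]
        · -- falsy: the section at s is good
          have hfalsy : pvFalsyAt st s = true := by simp [pvFalsyAt, hget, ht]
          have hgood' := hgood hfalsy
          simp only [pvGoodSecAt, Bool.and_eq_true] at hgood'
          obtain ⟨⟨hsec_some, hfee_some⟩, hdist_some⟩ := hgood' 
          cases hsec : PySem.List.pyGet? secs s with
          | none => rw [hsec] at hsec_some; simp at hsec_some
          | some sec =>
            rw [hsec] at hfee_some hdist_some
            simp only [Option.getD_some] at hfee_some hdist_some
            cases hfee : List.lookup "fee" sec with
            | none => rw [hfee] at hfee_some; simp at hfee_some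
            | some f =>
              cases hdist : List.lookup "distance" sec with
              | none => rw [hdist] at hdist_some; simp at hdist_some
              | some d =>
                have hinv' : ∀ i ∈ PySem.List.pyRange (s + 1) (st.length : Int) 1,
                    (∀ j ∈ PySem.List.pyRange (s + 1) i 1, pvFalsyAt st j = true) →
                    ((PySem.List.pyGet? st i).isSome ∧ (pvFalsyAt st i = true → pvGoodSecAt secs i = true)) := by
                  intro i hi hpref
                  rw [PySem.List.mem_pyRange_one] at hi
                  refine hinv i (by rw [PySem.List.mem_pyRange_one]; omega) ?_
                  intro j hj
                  rw [PySem.List.mem_pyRange_one] at hj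
                  by_cases hjs : j = s
                  · subst hjs; exact hfalsy
                  · exact hpref j (by rw [PySem.List.mem_pyRange_one]; omega)
                have hrec := ih (s + 1) (by omega) hinv' (fee + f) (dist + d)
                have hb := pvFindB_bounds st (st.length : Int) k (s + 1) (by omega) (by omega)
                simp only [pvLoopA, pvFindB, hget, ht, hsec, hfee, hdist, if_false, Bool.false_eq_true]
                rw [hrec]
                set b := (pvFindB (PySem.List.pyRange (s + 1) (st.length : Int) 1) st (st.length : Int)).2 with hbdef
                have hsplit : PySem.List.pyRange s b 1 = s :: PySem.List.pyRange (s + 1) b 1 :=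
                  PySem.List.pyRange_one_cons (by omega)
                rw [hsplit, pvSumKey_cons, pvSumKey_cons]
                simp only [hsec, hfee, hdist, Option.getD_some]
                refine Prod.ext rfl (Prod.ext ?_ ?_) <;> simp <;> ring
    · have hns : (st.length : Int) ≤ s := by omega
      rw [PySem.List.pyRange_one_eq_nil hns]
      simp [pvLoopA, pvFindB, PySem.List.pyRange_one_eq_nil hns, pvSumKey]

-- ===== VERDICT (by name: the statement is the Claim_ definition above) =====
theorem find_next_valid_station_id_and_accumulate_spec : Claim_equal_find_next_valid_station_id_and_accumulate := by
  intro ci st secs _ hpre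
  unfold Spec_find_next_valid_station_id_and_accumulate
  unfold find_next_valid_station_id_and_accumulate find_next_valid_station_id_and_accumulate_alt
  have h := pvMain st secs (st.length + (ci + 1).natAbs) (ci + 1) (by omega) hpre.2 0 0
  rw [h]
  simp
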